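-- pv_equiv track=rewrite | github.com/hareshav/Dynamic-Pricing-Assistant | api/app3.py | get_keyword_insights
-- ===== SOURCE A (Python) =====
-- from typing import List, Dict, Any
--
-- def get_keyword_insights(top_keywords: List[tuple], query: str) -> List[str]:
--     """Generates marketing insights from keyword trends"""
--     insights = []
--     query_terms = query.lower().split()
--
--     descriptor_terms = {'best', 'premium', 'cheap', 'affordable', 'luxury', 'wireless', 'smart'}
--     size_terms = {'small', 'large', 'medium', 'mini', 'compact', 'tall', 'wide'}
--     material_terms = {'leather', 'plastic', 'metal', 'cotton', 'wood', 'glass', 'steel'}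
--
--     missing_terms = [term for term in query_terms if term not in dict(top_keywords)]
--     if missing_terms:
--         insights.append(f"Query terms missing from top results: {', '.join(missing_terms)}")
--
--     found_descriptors = [term for term, _ in top_keywords if term in descriptor_terms]
--     found_sizes = [term for term, _ in top_keywords if term in size_terms]
--     found_materials = [term for term, _ in top_keywords if term in material_terms]
--
--     if found_descriptors:
--         insights.append(f"Common product descriptors: {', '.join(found_descriptors)}")
--     if found_sizes:
--         insights.append(f"Popular size terms: {', '.join(found_sizes)}")
--     if found_materials:
--         insights.append(f"Trending materials: {', '.join(found_materials)}")
--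
--     return insights
-- ===== SOURCE B (Python) =====
-- def get_keyword_insights(top_keywords, query):
--     """Generates marketing insights from keyword trends"""
--     category = {
--         'best': 'desc', 'premium': 'desc', 'cheap': 'desc', 'affordable': 'desc',
--         'luxury': 'desc', 'wireless': 'desc', 'smart': 'desc',
--         'small': 'size', 'large': 'size', 'medium': 'size', 'mini': 'size',
--         'compact': 'size', 'tall': 'size', 'wide': 'size',
--         'leather': 'mat', 'plastic': 'mat', 'metal': 'mat', 'cotton': 'mat',
--         'wood': 'mat', 'glass': 'mat', 'steel': 'mat',
--     }
--     known = {term for term, _ in top_keywords}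
--     missing = [t for t in query.lower().split() if t not in known]
--     labeled = [(category[term], term) for term, _ in top_keywords if term in category]
--     found = {'desc': [], 'size': [], 'mat': []}
--     for label, term in labeled:
--         found[label].append(term)
--     insights = []
--     if missing:
--         insights.append("Query terms missing from top results: " + ", ".join(missing))
--     if found['desc']:
--         insights.append("Common product descriptors: " + ", ".join(found['desc']))
--     if found['size']:
--         insights.append("Popular size terms: " + ", ".join(found['size']))
--     if found['mat']:
--         insights.append("Trending materials: " + ", ".join(found['mat']))
--     return insights
-- ===== Notes on version B (the rewrite author's own statement) =====
-- stated objective: alternative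
-- what changed: Replaces A's three separate per-category scans of top_keywords (each testing membership in its own set) by one literal classification dict mapping every term to its category label, a single labelling pass over top_keywords, and a grouping dict of per-category lists; missing terms are checked against a set of keys instead of a rebuilt dict.
import Mathlib
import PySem

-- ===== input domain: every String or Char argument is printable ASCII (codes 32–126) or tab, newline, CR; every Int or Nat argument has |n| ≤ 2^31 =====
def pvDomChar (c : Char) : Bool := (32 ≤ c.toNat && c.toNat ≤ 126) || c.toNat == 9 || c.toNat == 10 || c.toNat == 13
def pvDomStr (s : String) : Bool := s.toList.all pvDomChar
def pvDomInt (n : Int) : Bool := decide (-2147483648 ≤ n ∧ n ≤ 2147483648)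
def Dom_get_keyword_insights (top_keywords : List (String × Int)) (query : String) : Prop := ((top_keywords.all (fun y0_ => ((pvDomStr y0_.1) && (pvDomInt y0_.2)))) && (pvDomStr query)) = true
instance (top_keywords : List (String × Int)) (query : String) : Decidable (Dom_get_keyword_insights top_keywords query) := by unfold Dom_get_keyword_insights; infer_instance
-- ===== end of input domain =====

-- B replaces A's three per-category scans with one classification dict and a single
-- grouping pass over top_keywords (objective: alternative decomposition, same cost).

-- ===== PORT A =====
def get_keyword_insights (top_keywords : List (String × Int)) (query : String) : List String :=
  let insights : List String := []
  let query_terms := PySem.Str.split₀ (PySem.Str.lower query)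
  let descriptor_terms : PySem.Set String :=
    PySem.Set.ofList ["best", "premium", "cheap", "affordable", "luxury", "wireless", "smart"]
  let size_terms : PySem.Set String :=
    PySem.Set.ofList ["small", "large", "medium", "mini", "compact", "tall", "wide"]
  let material_terms : PySem.Set String :=
    PySem.Set.ofList ["leather", "plastic", "metal", "cotton", "wood", "glass", "steel"]
  let d := PySem.Dict.ofList top_keywords
  let missing_terms := query_terms.filter (fun term => !(d.contains term))
  let insights := if missing_terms.isEmpty then insights else
    insights ++ ["Query terms missing from top results: " ++ PySem.Str.join ", " missing_terms]
  let found_descriptors := (top_keywords.filter (fun p => PySem.Set.contains descriptor_terms p.1)).map (·.1)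
  let found_sizes := (top_keywords.filter (fun p => PySem.Set.contains size_terms p.1)).map (·.1)
  let found_materials := (top_keywords.filter (fun p => PySem.Set.contains material_terms p.1)).map (·.1)
  let insights := if found_descriptors.isEmpty then insights else
    insights ++ ["Common product descriptors: " ++ PySem.Str.join ", " found_descriptors]
  let insights := if found_sizes.isEmpty then insights else
    insights ++ ["Popular size terms: " ++ PySem.Str.join ", " found_sizes]
  let insights := if found_materials.isEmpty then insights else
    insights ++ ["Trending materials: " ++ PySem.Str.join ", " found_materials]
  insights

-- ===== PORT B =====
-- the literal classification dict of Source B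
def pvCategory : PySem.Dict String String :=
  PySem.Dict.ofList
    [("best", "desc"), ("premium", "desc"), ("cheap", "desc"), ("affordable", "desc"),
     ("luxury", "desc"), ("wireless", "desc"), ("smart", "desc"),
     ("small", "size"), ("large", "size"), ("medium", "size"), ("mini", "size"),
     ("compact", "size"), ("tall", "size"), ("wide", "size"),
     ("leather", "mat"), ("plastic", "mat"), ("metal", "mat"), ("cotton", "mat"),
     ("wood", "mat"), ("glass", "mat"), ("steel", "mat")]

def get_keyword_insights_alt (top_keywords : List (String × Int)) (query : String) : List String :=
  let known : PySem.Set String := PySem.Set.ofList (top_keywords.map (·.1))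
  let missing := (PySem.Str.split₀ (PySem.Str.lower query)).filter
    (fun t => !(PySem.Set.contains known t))
  -- category[term] under the 'term in category' guard: getD with a dummy default is exact here
  let labeled := (top_keywords.filter (fun p => pvCategory.contains p.1)).map
    (fun p => (pvCategory.getD p.1 "", p.1))
  let found : PySem.Dict String (List String) :=
    PySem.Dict.ofList [("desc", []), ("size", []), ("mat", [])]
  let found := labeled.foldl (fun d q => d.modify q.1 [] (· ++ [q.2])) found
  let insights : List String := []
  let insights := if missing.isEmpty then insights else
    insights ++ ["Query terms missing from top results: " ++ PySem.Str.join ", " missing]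
  let insights := if (found.getD "desc" []).isEmpty then insights else
    insights ++ ["Common product descriptors: " ++ PySem.Str.join ", " (found.getD "desc" [])]
  let insights := if (found.getD "size" []).isEmpty then insights else
    insights ++ ["Popular size terms: " ++ PySem.Str.join ", " (found.getD "size" [])]
  let insights := if (found.getD "mat" []).isEmpty then insights else
    insights ++ ["Trending materials: " ++ PySem.Str.join ", " (found.getD "mat" [])]
  insights

-- ===== PRECONDITION & SPEC =====
def Spec_get_keyword_insights (top_keywords : List (String × Int)) (query : String) (out : List String) : Prop := out = get_keyword_insights_alt top_keywords query
instance (top_keywords : List (String × Int)) (query : String) (out : List String) : Decidable (Spec_get_keyword_insights top_keywords query out) := by unfold Spec_get_keyword_insights; infer_instance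

-- ===== CLAIM (what is proved, stated in full; the proofs are below) =====
def Claim_equal_get_keyword_insights : Prop := ∀ (top_keywords : List (String × Int)) (query : String), Dom_get_keyword_insights top_keywords query → Spec_get_keyword_insights top_keywords query (get_keyword_insights top_keywords query)

-- ===== LEMMAS AND PROOFS =====

-- dict(top_keywords) membership = membership among the keys
lemma dict_contains_eq (l : List (String × Int)) (k : String) :
    (PySem.Dict.ofList l).contains k = PySem.Set.contains (PySem.Set.ofList (l.map (·.1))) k := by
  rw [show (PySem.Dict.ofList l) = l.foldl (fun d p => d.insert p.1 p.2) PySem.Dict.empty from rfl,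
      PySem.Dict.contains_eq_decide_mem_keys,
      PySem.Dict.keys_foldl_insert_key (key := Prod.fst) (f := fun d p => p.2)]
  simp [pysem]

-- pvCategory as a literal association list
lemma pvCategory_mk : pvCategory = PySem.Dict.mk
    [("best", "desc"), ("premium", "desc"), ("cheap", "desc"), ("affordable", "desc"),
     ("luxury", "desc"), ("wireless", "desc"), ("smart", "desc"),
     ("small", "size"), ("large", "size"), ("medium", "size"), ("mini", "size"),
     ("compact", "size"), ("tall", "size"), ("wide", "size"),
     ("leather", "mat"), ("plastic", "mat"), ("metal", "mat"), ("cotton", "mat"),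
     ("wood", "mat"), ("glass", "mat"), ("steel", "mat")] := by decide

-- pointwise: "term classified with label L" = "term in the L-category set"
lemma cat_spec (L : String) (S : List String)
    (hL : (L, S) ∈ [("desc", ["best", "premium", "cheap", "affordable", "luxury", "wireless", "smart"]),
                    ("size", ["small", "large", "medium", "mini", "compact", "tall", "wide"]),
                    ("mat",  ["leather", "plastic", "metal", "cotton", "wood", "glass", "steel"])])
    (t : String) :
    (pvCategory.contains t && (pvCategory.getD t "" == L)) = PySem.Set.contains (PySem.Set.ofList S) t := by
  by_cases h1 : t = "best"; · subst h1; fin_cases hL <;> decide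
  by_cases h2 : t = "premium"; · subst h2; fin_cases hL <;> decide
  by_cases h3 : t = "cheap"; · subst h3; fin_cases hL <;> decide
  by_cases h4 : t = "affordable"; · subst h4; fin_cases hL <;> decide
  by_cases h5 : t = "luxury"; · subst h5; fin_cases hL <;> decide
  by_cases h6 : t = "wireless"; · subst h6; fin_cases hL <;> decide
  by_cases h7 : t = "smart"; · subst h7; fin_cases hL <;> decide
  by_cases h8 : t = "small"; · subst h8; fin_cases hL <;> decide
  by_cases h9 : t = "large"; · subst h9; fin_cases hL <;> decide
  by_cases h10 : t = "medium"; · subst h10; fin_cases hL <;> decide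
  by_cases h11 : t = "mini"; · subst h11; fin_cases hL <;> decide
  by_cases h12 : t = "compact"; · subst h12; fin_cases hL <;> decide
  by_cases h13 : t = "tall"; · subst h13; fin_cases hL <;> decide
  by_cases h14 : t = "wide"; · subst h14; fin_cases hL <;> decide
  by_cases h15 : t = "leather"; · subst h15; fin_cases hL <;> decide
  by_cases h16 : t = "plastic"; · subst h16; fin_cases hL <;> decide
  by_cases h17 : t = "metal"; · subst h17; fin_cases hL <;> decide
  by_cases h18 : t = "cotton"; · subst h18; fin_cases hL <;> decide
  by_cases h19 : t = "wood"; · subst h19; fin_cases hL <;> decide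
  by_cases h20 : t = "glass"; · subst h20; fin_cases hL <;> decide
  by_cases h21 : t = "steel"; · subst h21; fin_cases hL <;> decide
  have hnone : pvCategory.get? t = none := by
    rw [pvCategory_mk]
    simp only [PySem.Dict.get?_mk_cons, beq_iff_eq]
    rw [if_neg (Ne.symm h1), if_neg (Ne.symm h2), if_neg (Ne.symm h3), if_neg (Ne.symm h4),
        if_neg (Ne.symm h5), if_neg (Ne.symm h6), if_neg (Ne.symm h7), if_neg (Ne.symm h8),
        if_neg (Ne.symm h9), if_neg (Ne.symm h10), if_neg (Ne.symm h11), if_neg (Ne.symm h12),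
        if_neg (Ne.symm h13), if_neg (Ne.symm h14), if_neg (Ne.symm h15), if_neg (Ne.symm h16),
        if_neg (Ne.symm h17), if_neg (Ne.symm h18), if_neg (Ne.symm h19), if_neg (Ne.symm h20),
        if_neg (Ne.symm h21)]
    rfl
  have hc : pvCategory.contains t = false := by
    rw [PySem.Dict.contains_eq_isSome_get?, hnone]; rfl
  have hs : PySem.Set.contains (PySem.Set.ofList S) t = false := by
    fin_cases hL <;>
      simp_all [PySem.Set.contains_eq_listContains, List.contains_eq_mem, PySem.Set.mem_ofList]
  rw [hc, hs]; rfl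

-- one category list of B's grouping fold = A's corresponding filter pass
lemma found_eq (top_keywords : List (String × Int)) (L : String) (S : List String)
    (hL : (L, S) ∈ [("desc", ["best", "premium", "cheap", "affordable", "luxury", "wireless", "smart"]),
                    ("size", ["small", "large", "medium", "mini", "compact", "tall", "wide"]),
                    ("mat",  ["leather", "plastic", "metal", "cotton", "wood", "glass", "steel"])]) :
    (((top_keywords.filter (fun p => pvCategory.contains p.1)).map
        (fun p => (pvCategory.getD p.1 "", p.1))).foldl
      (fun d q => d.modify q.1 [] (· ++ [q.2]))
      (PySem.Dict.ofList [("desc", []), ("size", []), ("mat", [])])).getD L []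
    = (top_keywords.filter (fun p => PySem.Set.contains (PySem.Set.ofList S) p.1)).map (·.1) := by
  rw [PySem.Dict.getD_foldl_modify_append]
  have hinit : (PySem.Dict.ofList [("desc", ([] : List String)), ("size", []), ("mat", [])]).getD L [] = [] := by
    fin_cases hL <;> decide
  rw [hinit, List.nil_append, List.filter_map, List.map_map, List.filter_filter]
  simp only [Function.comp_def]
  rw [show (fun a : String × Int => (pvCategory.getD a.1 "" == L) && pvCategory.contains a.1)
        = (fun a : String × Int => PySem.Set.contains (PySem.Set.ofList S) a.1) from
      funext fun p => by rw [Bool.and_comm]; exact cat_spec L S hL p.1]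

-- ===== VERDICT (by name: the statement is the Claim_ definition above) =====
theorem get_keyword_insights_spec : Claim_equal_get_keyword_insights := by
  intro top_keywords query _
  unfold Spec_get_keyword_insights get_keyword_insights get_keyword_insights_alt
  simp only
  rw [found_eq top_keywords "desc" ["best", "premium", "cheap", "affordable", "luxury", "wireless", "smart"] (by simp),
      found_eq top_keywords "size" ["small", "large", "medium", "mini", "compact", "tall", "wide"] (by simp),
      found_eq top_keywords "mat" ["leather", "plastic", "metal", "cotton", "wood", "glass", "steel"] (by simp)]
  rw [show (fun term : String => !(PySem.Dict.ofList top_keywords).contains term)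
        = (fun t : String => !(PySem.Set.ofList (top_keywords.map (·.1))).contains t) from
      funext fun t => by rw [dict_contains_eq top_keywords t]]
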